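-- pv_equiv track=rewrite | github.com/p4vl3n/Travel | Fundamentals/04.  Functions - Exercise/10. Array Manipulator.py | last_odd_even
-- ===== SOURCE A (Python) =====
-- def last_odd_even(lst, index, odd_or_even):
--     if odd_or_even == "odd":
--         last_n_odd = []
--         for n in range(len(lst)):
--             if not lst[n] % 2 == 0:
--                 last_n_odd.append(lst[n])
--         last_n_odd = last_n_odd[-1:-index-1:-1]
--         last_n_odd.reverse()
--         return last_n_odd
--     elif odd_or_even == "even":
--         last_n_even = []
--         for n in range(len(lst)):
--             if lst[n] % 2 == 0:
--                 last_n_even.append(lst[n])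
--         last_n_even = last_n_even[-1:-index-1:-1]
--         last_n_even.reverse()
--         return last_n_even
-- ===== SOURCE B (Python) =====
-- def last_odd_even(lst, index, odd_or_even):
--     if odd_or_even == "odd":
--         want = 1
--     elif odd_or_even == "even":
--         want = 0
--     else:
--         return None
--     out = []
--     for x in reversed(lst):
--         if len(out) >= index:
--             break
--         if x % 2 == want:
--             out.append(x)
--     out.reverse()
--     return out
-- ===== Notes on version B (the rewrite author's own statement) =====
-- stated objective: simpler
-- what changed: B makes one backward pass over the list that stops as soon as it has collected `index` matching elements, instead of A's filter-everything pass followed by a negative-step slice and a reverse.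
-- outside the precondition, e.g. on last_odd_even([1, 2, 3], -1, 'odd'): A returns [3], B returns []
import Mathlib
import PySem

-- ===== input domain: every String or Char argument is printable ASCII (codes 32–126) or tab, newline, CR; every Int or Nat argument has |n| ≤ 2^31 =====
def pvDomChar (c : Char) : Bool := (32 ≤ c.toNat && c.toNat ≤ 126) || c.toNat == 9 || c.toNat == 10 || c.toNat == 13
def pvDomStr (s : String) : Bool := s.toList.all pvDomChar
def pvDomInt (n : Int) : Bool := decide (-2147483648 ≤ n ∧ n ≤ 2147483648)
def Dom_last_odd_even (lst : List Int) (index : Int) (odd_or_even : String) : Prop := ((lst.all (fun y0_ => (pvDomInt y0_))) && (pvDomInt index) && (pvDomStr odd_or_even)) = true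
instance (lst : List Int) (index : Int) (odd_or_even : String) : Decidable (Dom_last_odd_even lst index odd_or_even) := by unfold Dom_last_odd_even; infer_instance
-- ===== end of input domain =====

-- B replaces A's filter-all + negative-step slice + reverse by one backward pass that stops after `index` matches (simpler).


-- ===== PORT A =====
def last_odd_even (lst : List Int) (index : Int) (odd_or_even : String) : Option (List Int) :=
  if odd_or_even == "odd" then
    let last_n_odd := lst.foldl (fun acc x => if !(PySem.Int.mod x 2 == 0) then acc ++ [x] else acc) []
    (PySem.List.slice? last_n_odd (some (-1)) (some (-index - 1)) (-1)).map List.reverse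
  else if odd_or_even == "even" then
    let last_n_even := lst.foldl (fun acc x => if PySem.Int.mod x 2 == 0 then acc ++ [x] else acc) []
    (PySem.List.slice? last_n_even (some (-1)) (some (-index - 1)) (-1)).map List.reverse
  else none

-- ===== PORT B =====
-- backward scan of Source B: collect matching elements until `out` holds `index` of them (the `break`)
def pvCollect (want : Int) (index : Int) : List Int → List Int → List Int
  | [], out => out
  | x :: rest, out =>
    if (out.length : Int) ≥ index then out
    else if PySem.Int.mod x 2 == want then pvCollect want index rest (out ++ [x])
    else pvCollect want index rest out

def last_odd_even_alt (lst : List Int) (index : Int) (odd_or_even : String) : Option (List Int) :=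
  if odd_or_even == "odd" then some ((pvCollect 1 index lst.reverse []).reverse)
  else if odd_or_even == "even" then some ((pvCollect 0 index lst.reverse []).reverse)
  else none

-- ===== PRECONDITION & SPEC =====
-- Pre_ excludes the corner no caller would specify — a negative `index` with more than -index parity-matching
-- elements: there A's [-1:-index-1:-1] slice returns an accidental nonempty suffix while B's early-stop loop returns [].
def Pre_last_odd_even (lst : List Int) (index : Int) (odd_or_even : String) : Prop :=
  0 ≤ index ∨
    ((odd_or_even = "odd" → ((lst.countP (fun x => PySem.Int.mod x 2 == 1)) : Int) ≤ -index) ∧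
     (odd_or_even = "even" → ((lst.countP (fun x => PySem.Int.mod x 2 == 0)) : Int) ≤ -index))
instance (lst : List Int) (index : Int) (odd_or_even : String) : Decidable (Pre_last_odd_even lst index odd_or_even) := by unfold Pre_last_odd_even; infer_instance
def pvWitness_last_odd_even : List Int × Int × String := ([1, 2, 3, 4], 2, "odd")

def Spec_last_odd_even (lst : List Int) (index : Int) (odd_or_even : String) (out : Option (List Int)) : Prop := out = last_odd_even_alt lst index odd_or_even
instance (lst : List Int) (index : Int) (odd_or_even : String) (out : Option (List Int)) : Decidable (Spec_last_odd_even lst index odd_or_even out) := by unfold Spec_last_odd_even; infer_instance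

-- ===== CLAIM (what is proved, stated in full; the proofs are below) =====
def Claim_equal_last_odd_even : Prop := ∀ (lst : List Int) (index : Int) (odd_or_even : String), Dom_last_odd_even lst index odd_or_even → Pre_last_odd_even lst index odd_or_even → Spec_last_odd_even lst index odd_or_even (last_odd_even lst index odd_or_even)

-- ===== LEMMAS AND PROOFS =====

-- the index map inside slice? with step -1 reads the last c elements back to front
lemma pv_filterMap_range (l : List Int) (c : Nat) (hc : c ≤ l.length) :
    (List.range c).filterMap (fun k : Nat => l[(-1 + (l.length : Int) + -(k : Int)).toNat]?) =
      (l.drop (l.length - c)).reverse := by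
  induction c with
  | zero => simp
  | succ c ih =>
    rw [List.range_succ, List.filterMap_append, ih (by omega)]
    have h1 : (-1 + (l.length : Int) + -(c : Int)).toNat = l.length - 1 - c := by omega
    have h2 : l.length - 1 - c < l.length := by omega
    have h3 : l.length - (c + 1) = l.length - 1 - c := by omega
    have hd : l.drop (l.length - 1 - c) = l[l.length - 1 - c] :: l.drop (l.length - c) := by
      rw [List.drop_eq_getElem_cons h2, show l.length - 1 - c + 1 = l.length - c from by omega]
    rw [h3, hd]
    simp [List.filterMap, h1, List.getElem?_eq_getElem h2]

-- A's slice [-1:-index-1:-1] for 0 ≤ index is the last min(index, len) elements, reversed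
lemma pv_sliceA (l : List Int) (index : Int) (h : 0 ≤ index) :
    PySem.List.slice? l (some (-1)) (some (-index - 1)) (-1) =
      some ((l.drop (l.length - index.toNat)).reverse) := by
  unfold PySem.List.slice? PySem.List.sliceIndices
  norm_num
  rw [if_pos (show -index < 1 by omega)]
  by_cases hbig : (l.length : Int) ≤ index
  · have hmax : max (-index - 1 + (l.length : Int)) (-1) = -1 := by omega
    rw [hmax]
    by_cases hlen : 0 < l.length
    · rw [if_pos (by omega : (1 : Int) + -1 < (l.length : Int))]
      rw [show ((-1 : Int) + (l.length : Int) - -1).toNat = l.length from by omega]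
      rw [pv_filterMap_range l l.length le_rfl]
      rw [show l.length - index.toNat = l.length - l.length from by omega]
    · rw [if_neg (by omega : ¬ ((1 : Int) + -1 < (l.length : Int)))]
      simp
      omega
  · have hmax : max (-index - 1 + (l.length : Int)) (-1) = (l.length : Int) - index - 1 := by omega
    rw [hmax]
    by_cases hz : 0 < index
    · rw [if_pos (by omega : (1 : Int) + ((l.length : Int) - index - 1) < (l.length : Int))]
      rw [show ((-1 : Int) + (l.length : Int) - ((l.length : Int) - index - 1)).toNat = index.toNat from by omega]
      rw [pv_filterMap_range l index.toNat (by omega)]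
    · rw [if_neg (by omega : ¬ ((1 : Int) + ((l.length : Int) - index - 1) < (l.length : Int)))]
      rw [show index.toNat = 0 from by omega]
      simp

-- B's backward collecting loop is a take of the filtered list
lemma pv_collect_eq (want index : Int) (ys out : List Int) :
    pvCollect want index ys out =
      out ++ (ys.filter (fun x => PySem.Int.mod x 2 == want)).take ((index - out.length).toNat) := by
  induction ys generalizing out with
  | nil => simp [pvCollect]
  | cons x rest ih =>
    unfold pvCollect
    by_cases hfull : (out.length : Int) ≥ index
    · rw [if_pos hfull]
      have h0 : (index - (out.length : Int)).toNat = 0 := by omega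
      rw [h0, List.take_zero, List.append_nil]
    · rw [if_neg hfull]
      by_cases hp : PySem.Int.mod x 2 == want
      · rw [if_pos hp, ih, List.filter_cons, if_pos hp]
        have hl : (((out ++ [x]).length : Nat) : Int) = (out.length : Int) + 1 := by simp
        rw [hl]
        have hn : (index - (out.length : Int)).toNat = (index - ((out.length : Int) + 1)).toNat + 1 := by omega
        rw [hn, List.take_succ_cons, List.append_assoc, List.singleton_append]
      · rw [if_neg hp, ih, List.filter_cons, if_neg hp]

-- A's slice [-1:-index-1:-1] for index < 0 is empty when the list has at most -index elements
lemma pv_sliceA_neg (l : List Int) (index : Int) (h : index < 0) (hlen : (l.length : Int) ≤ -index) :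
    PySem.List.slice? l (some (-1)) (some (-index - 1)) (-1) = some [] := by
  unfold PySem.List.slice? PySem.List.sliceIndices
  norm_num
  rw [if_neg (show ¬ (-index < 1) by omega)]
  rw [show min (-index - 1) ((l.length : Int) - 1) = (l.length : Int) - 1 from by omega]
  rw [if_neg (by omega : ¬ ((1 : Int) + ((l.length : Int) - 1) < (l.length : Int)))]
  simp

-- B's collecting loop stops at once for index ≤ 0
lemma pv_collect_nonpos (want index : Int) (ys : List Int) (h : index ≤ 0) :
    pvCollect want index ys [] = [] := by
  cases ys with
  | nil => rfl
  | cons x rest =>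
    unfold pvCollect
    rw [if_pos (by simpa using h)]

-- one parity branch: A's value = B's value for 0 ≤ index
lemma pv_branch (lst : List Int) (index : Int) (h : 0 ≤ index) (p : Int → Bool)
    (want : Int) (hpw : ∀ x, p x = (PySem.Int.mod x 2 == want)) :
    (PySem.List.slice? (lst.foldl (fun acc x => if p x then acc ++ [x] else acc) [])
        (some (-1)) (some (-index - 1)) (-1)).map List.reverse =
      some ((pvCollect want index lst.reverse []).reverse) := by
  rw [PySem.List.foldl_append_if_eq_filter, List.nil_append, pv_sliceA _ _ h,
      pv_collect_eq, List.nil_append]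
  have hfe : lst.reverse.filter (fun x => PySem.Int.mod x 2 == want) = (lst.filter p).reverse := by
    rw [← List.filter_reverse]
    exact List.filter_congr (fun x _ => (hpw x).symm)
  rw [hfe, Option.map_some, List.reverse_reverse]
  congr 1
  simp only [List.length_nil]
  rw [show (index - ((0 : Nat) : Int)).toNat = index.toNat from by omega]
  rw [List.take_reverse, List.reverse_reverse]

-- one parity branch, negative index with at most -index matching elements: both sides are []
lemma pv_branch_neg (lst : List Int) (index : Int) (h : index < 0) (p : Int → Bool)
    (want : Int) (hpw : ∀ x, p x = (PySem.Int.mod x 2 == want))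
    (hcnt : ((lst.countP (fun x => PySem.Int.mod x 2 == want)) : Int) ≤ -index) :
    (PySem.List.slice? (lst.foldl (fun acc x => if p x then acc ++ [x] else acc) [])
        (some (-1)) (some (-index - 1)) (-1)).map List.reverse =
      some ((pvCollect want index lst.reverse []).reverse) := by
  rw [PySem.List.foldl_append_if_eq_filter, List.nil_append,
      pv_collect_nonpos want index lst.reverse (by omega)]
  have hlen : (((lst.filter p).length : Nat) : Int) ≤ -index := by
    rw [← List.countP_eq_length_filter, List.countP_congr (fun x _ => by rw [hpw x])]
    exact hcnt
  rw [pv_sliceA_neg _ index h hlen]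
  rfl

-- ===== VERDICT (by name: the statement is the Claim_ definition above) =====
theorem last_odd_even_spec : Claim_equal_last_odd_even := by
  intro lst index odd_or_even _ hpre
  unfold Spec_last_odd_even last_odd_even last_odd_even_alt
  have hodd : ∀ x, (!(PySem.Int.mod x 2 == 0)) = (PySem.Int.mod x 2 == 1) := fun x => by
    rcases PySem.Int.mod_two_eq x with h | h <;> rw [h] <;> decide
  by_cases hneg : 0 ≤ index
  · by_cases h1 : odd_or_even == "odd"
    · rw [if_pos h1, if_pos h1]
      exact pv_branch lst index hneg _ 1 hodd
    · rw [if_neg h1, if_neg h1]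
      by_cases h2 : odd_or_even == "even"
      · rw [if_pos h2, if_pos h2]
        exact pv_branch lst index hneg _ 0 (fun x => rfl)
      · rw [if_neg h2, if_neg h2]
  · have h : index < 0 := by omega
    rcases hpre with hge | ⟨ho, he⟩
    · omega
    · by_cases h1 : odd_or_even == "odd"
      · rw [if_pos h1, if_pos h1]
        exact pv_branch_neg lst index h _ 1 hodd (ho (by simpa using h1))
      · rw [if_neg h1, if_neg h1]
        by_cases h2 : odd_or_even == "even"
        · rw [if_pos h2, if_pos h2]
          exact pv_branch_neg lst index h _ 0 (fun x => rfl) (he (by simpa using h2))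
        · rw [if_neg h2, if_neg h2]
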